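-- pv_equiv track=rewrite | github.com/jenish2917/smartgriev | backend/chatbot/utils.py | analyze_urgency
-- ===== SOURCE A (Python) =====
-- from enum import Enum
--
-- class Priority(Enum):
--     LOW = "low"
--     MEDIUM = "medium"
--     HIGH = "high"
--     CRITICAL = "critical"
--
-- def analyze_urgency(message: str) -> str:
--     """Analyze urgency level based on keywords"""
--     message_lower = message.lower()
--
--     urgency_keywords = {
--         Priority.CRITICAL: ['emergency', 'urgent', 'critical', 'immediate', 'dangerous', 'safety', 'life', 'death'],
--         Priority.HIGH: ['serious', 'major', 'important', 'significant', 'severe'],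
--         Priority.MEDIUM: ['moderate', 'concerning', 'issue', 'problem']
--     }
--
--     for priority, keywords in urgency_keywords.items():
--         if any(keyword in message_lower for keyword in keywords):
--             return priority.value
--
--     return Priority.LOW.value
-- ===== SOURCE B (Python) =====
-- _CRITICAL = ['emergency', 'urgent', 'critical', 'immediate', 'dangerous', 'safety', 'life', 'death']
-- _HIGH = ['serious', 'major', 'important', 'significant', 'severe']
-- _MEDIUM = ['moderate', 'concerning', 'issue', 'problem']
--
-- # flat keyword -> numeric rank table (3 = critical, 2 = high, 1 = medium)
-- _KEYWORD_RANK = [(kw, 3) for kw in _CRITICAL] + \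
--                 [(kw, 2) for kw in _HIGH] + \
--                 [(kw, 1) for kw in _MEDIUM]
--
-- _RANK_NAME = {3: 'critical', 2: 'high', 1: 'medium'}
--
-- def analyze_urgency(message: str) -> str:
--     """Analyze urgency level based on keywords (flat max-rank scan)."""
--     message_lower = message.lower()
--     best = 0
--     for kw, rank in _KEYWORD_RANK:
--         if kw in message_lower and rank > best:
--             best = rank
--     return _RANK_NAME.get(best, 'low')
-- ===== Notes on version B (the rewrite author's own statement) =====
-- stated objective: alternative
-- what changed: Replaces the tiered dict of keyword lists with early-return per tier by a single flat (keyword, rank) table scanned once while tracking the maximum rank, which is then mapped back to the priority string.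
import Mathlib
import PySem

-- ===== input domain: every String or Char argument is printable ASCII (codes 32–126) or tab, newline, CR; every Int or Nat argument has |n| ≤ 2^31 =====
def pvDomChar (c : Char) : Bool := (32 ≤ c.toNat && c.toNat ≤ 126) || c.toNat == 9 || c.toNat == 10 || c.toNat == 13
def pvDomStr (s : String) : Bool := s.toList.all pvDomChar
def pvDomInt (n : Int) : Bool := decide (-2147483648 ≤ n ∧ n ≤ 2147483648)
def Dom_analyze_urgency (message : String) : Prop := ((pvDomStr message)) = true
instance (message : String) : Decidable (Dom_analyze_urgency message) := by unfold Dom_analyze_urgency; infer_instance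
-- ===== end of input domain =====

-- B replaces A's tiered keyword lists with early return by one flat (keyword, rank)
-- table scanned once keeping the maximum rank (alternative decomposition, same cost).


-- ===== PORT A =====
def critKws : List String := ["emergency", "urgent", "critical", "immediate", "dangerous", "safety", "life", "death"]
def highKws : List String := ["serious", "major", "important", "significant", "severe"]
def medKws : List String := ["moderate", "concerning", "issue", "problem"]

def analyze_urgency (message : String) : String :=
  let message_lower := PySem.Str.lower message
  if critKws.any (fun kw => PySem.Str.isIn kw message_lower) then "critical"
  else if highKws.any (fun kw => PySem.Str.isIn kw message_lower) then "high"
  else if medKws.any (fun kw => PySem.Str.isIn kw message_lower) then "medium"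
  else "low"

-- ===== PORT B =====
def kwRank : List (String × Int) :=
  critKws.map (fun kw => (kw, 3)) ++ highKws.map (fun kw => (kw, 2)) ++ medKws.map (fun kw => (kw, 1))

def rankName : PySem.Dict Int String := PySem.Dict.mk [(3, "critical"), (2, "high"), (1, "medium")]

def analyze_urgency_alt (message : String) : String :=
  let message_lower := PySem.Str.lower message
  let best : Int := kwRank.foldl
    (fun best p => if PySem.Str.isIn p.1 message_lower && decide (best < p.2) then p.2 else best) 0
  PySem.Dict.getD rankName best "low"

-- ===== PRECONDITION & SPEC =====
def Spec_analyze_urgency (message : String) (out : String) : Prop := out = analyze_urgency_alt message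
instance (message : String) (out : String) : Decidable (Spec_analyze_urgency message out) := by unfold Spec_analyze_urgency; infer_instance

-- ===== CLAIM (what is proved, stated in full; the proofs are below) =====
def Claim_equal_analyze_urgency : Prop := ∀ (message : String), Dom_analyze_urgency message → Spec_analyze_urgency message (analyze_urgency message)

-- ===== LEMMAS AND PROOFS =====

-- the max-scan over one constant-rank group: it bumps the accumulator to k iff some keyword matches and k is larger
theorem foldl_group (ml : String) (kws : List String) (k acc : Int) :
    (kws.map (fun kw => (kw, k))).foldl
      (fun best p => if PySem.Str.isIn p.1 ml && decide (best < p.2) then p.2 else best) acc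
    = if kws.any (fun kw => PySem.Str.isIn kw ml) && decide (acc < k) then k else acc := by
  induction kws generalizing acc with
  | nil => simp
  | cons kw rest ih =>
    simp only [List.map_cons, List.foldl_cons, List.any_cons]
    rw [ih]
    by_cases hb : PySem.Str.isIn kw ml = true <;> by_cases h2 : acc < k <;> simp_all <;> omega

-- ===== VERDICT (by name: the statement is the Claim_ definition above) =====
theorem analyze_urgency_spec : Claim_equal_analyze_urgency := by
  intro m _
  unfold Spec_analyze_urgency analyze_urgency analyze_urgency_alt kwRank
  simp only [List.foldl_append, foldl_group]
  generalize critKws.any (fun kw => PySem.Str.isIn kw (PySem.Str.lower m)) = c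
  generalize highKws.any (fun kw => PySem.Str.isIn kw (PySem.Str.lower m)) = h
  generalize medKws.any (fun kw => PySem.Str.isIn kw (PySem.Str.lower m)) = d
  cases c <;> cases h <;> cases d <;> rfl
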